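-- pv_equiv track=rewrite | github.com/3351666087/ks5002-soccer-robot-tutorial4 | ht16k33matrix.py | _icon_to_pixels
-- ===== SOURCE A (Python) =====
-- def _icon_to_pixels(icon):
--     pixels = [[0] * 8 for _ in range(8)]
--     row = 0
--     while row < 8:
--         value = icon[row]
--         column = 0
--         while column < 8:
--             pixels[row][column] = 1 if (value & (1 << (7 - column))) else 0
--             column += 1
--         row += 1
--     return pixels
-- ===== SOURCE B (Python) =====
-- def _icon_to_pixels(icon):
--     # Each row: format the byte as an 8-char binary string and read the pixels off it.
--     return [[1 if c == '1' else 0 for c in format(icon[row] & 0xFF, '08b')]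
--             for row in range(8)]
-- ===== Notes on version B (the rewrite author's own statement) =====
-- stated objective: idiomatic
-- what changed: Replaces the nested while loops that test each bit with shift-and-mask and mutate a preallocated 8x8 grid by a comprehension that formats each row byte as an 8-character binary string and maps its characters to 0/1.
import Mathlib
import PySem

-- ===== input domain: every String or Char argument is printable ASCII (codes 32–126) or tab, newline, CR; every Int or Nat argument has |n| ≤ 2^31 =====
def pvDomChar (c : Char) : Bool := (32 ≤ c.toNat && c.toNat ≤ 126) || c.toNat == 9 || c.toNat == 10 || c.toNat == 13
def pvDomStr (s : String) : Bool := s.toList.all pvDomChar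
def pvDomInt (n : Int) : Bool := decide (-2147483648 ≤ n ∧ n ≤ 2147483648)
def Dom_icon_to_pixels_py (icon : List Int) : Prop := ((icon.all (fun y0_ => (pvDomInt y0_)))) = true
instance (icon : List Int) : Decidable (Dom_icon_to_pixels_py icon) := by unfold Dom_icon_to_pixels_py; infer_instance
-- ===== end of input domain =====

-- B reads each row's pixels off an 8-character binary-string rendering of the byte instead of
-- A's nested while loops that shift-and-mask each bit into a preallocated 8x8 grid (objective: idiomatic).

-- ===== PORT A =====
-- 'pixels[row][column] = 1 if (value & (1 << (7 - column))) else 0' for one column step;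
-- column ∈ [0,7] here, so (7 - column).toNat is exactly Python's 7 - column.
def bitA (value : Int) (column : Int) : Int :=
  if PySem.Int.band value ((1:Int) <<< (7 - column).toNat) = 0 then 0 else 1

-- the inner 'while column < 8' loop (column = 0,1,…,7), mutating pixels
def innerA (value : Int) (pixels : List (List Int)) (row : Int) : List (List Int) :=
  (PySem.List.pyRange 0 8 1).foldl (fun pixels column =>
    PySem.List.pySetD pixels row
      (PySem.List.pySetD (PySem.List.pyGetD pixels row []) column (bitA value column))) pixels

-- the outer 'while row < 8' loop over the preallocated 8x8 zero grid;
-- icon[row] is PySem.List.pyGetD, exact under Pre_ (8 ≤ icon.length)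
def icon_to_pixels_py (icon : List Int) : List (List Int) :=
  (PySem.List.pyRange 0 8 1).foldl (fun pixels row =>
    innerA (PySem.List.pyGetD icon row 0) pixels row)
    (List.replicate 8 (List.replicate 8 (0:Int)))

-- ===== PORT B =====
-- binary digits of n, most significant first, fuel-bounded; exact for n < 2^fuel (called with fuel 8 on n < 256)
def pvBinAux : Nat → Nat → List Char
  | 0, _ => []
  | fuel+1, n => if n = 0 then [] else pvBinAux fuel (n/2) ++ [if n % 2 = 1 then '1' else '0']

-- format(n, '08b') as a char list, for n < 256: binary rendering zero-padded to width 8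
def pvBin8 (n : Nat) : List Char :=
  let s := if n = 0 then ['0'] else pvBinAux 8 n
  List.replicate (8 - s.length) '0' ++ s

-- one row of B: '[1 if c == '1' else 0 for c in format(icon[row] & 0xFF, '08b')]'
def pvRowB (v : Int) : List Int :=
  (pvBin8 ((PySem.Int.band v 255).toNat)).map (fun c => if c = '1' then (1:Int) else 0)

def icon_to_pixels_py_alt (icon : List Int) : List (List Int) :=
  (PySem.List.pyRange 0 8 1).map (fun row => pvRowB (PySem.List.pyGetD icon row 0))

-- ===== PRECONDITION & SPEC =====
-- icon[row] for row = 0..7 raises IndexError when icon has fewer than 8 entries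
def Pre_icon_to_pixels_py (icon : List Int) : Prop := 8 ≤ icon.length
instance (icon : List Int) : Decidable (Pre_icon_to_pixels_py icon) := by unfold Pre_icon_to_pixels_py; infer_instance
def pvWitness_icon_to_pixels_py : List Int := [0, 1, 2, 3, 252, 253, 254, 255]

def Spec_icon_to_pixels_py (icon : List Int) (out : List (List Int)) : Prop := out = icon_to_pixels_py_alt icon
instance (icon : List Int) (out : List (List Int)) : Decidable (Spec_icon_to_pixels_py icon out) := by unfold Spec_icon_to_pixels_py; infer_instance

-- ===== CLAIM (what is proved, stated in full; the proofs are below) =====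
def Claim_equal_icon_to_pixels_py : Prop := ∀ (icon : List Int), Dom_icon_to_pixels_py icon → Pre_icon_to_pixels_py icon → Spec_icon_to_pixels_py icon (icon_to_pixels_py icon)

-- ===== LEMMAS AND PROOFS =====

-- the row A's inner loop writes for byte value v
def rowAlist (v : Int) : List Int :=
  [bitA v 0, bitA v 1, bitA v 2, bitA v 3, bitA v 4, bitA v 5, bitA v 6, bitA v 7]

theorem pyRange8 : PySem.List.pyRange 0 8 1 = [0,1,2,3,4,5,6,7] := by decide

set_option maxHeartbeats 800000 in
theorem innerA_eq (v : Int) (ps : List (List Int)) (r : Nat) (hr : r < ps.length)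
    (a0 a1 a2 a3 a4 a5 a6 a7 : Int) (hrow : ps[r]? = some [a0,a1,a2,a3,a4,a5,a6,a7]) :
    innerA v ps (r:Int) = ps.set r (rowAlist v) := by
  have hrow' : ps[r] = [a0,a1,a2,a3,a4,a5,a6,a7] := by
    rw [List.getElem?_eq_getElem hr] at hrow; exact Option.some.inj hrow
  simp only [innerA, pyRange8, List.foldl_cons, List.foldl_nil]
  simp [pysem, hr, List.set_set, rowAlist]
  rw [hrow']
  simp [List.set]

set_option maxHeartbeats 800000 in
theorem charA (icon : List Int) : icon_to_pixels_py icon =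
    [rowAlist (PySem.List.pyGetD icon 0 0), rowAlist (PySem.List.pyGetD icon 1 0),
     rowAlist (PySem.List.pyGetD icon 2 0), rowAlist (PySem.List.pyGetD icon 3 0),
     rowAlist (PySem.List.pyGetD icon 4 0), rowAlist (PySem.List.pyGetD icon 5 0),
     rowAlist (PySem.List.pyGetD icon 6 0), rowAlist (PySem.List.pyGetD icon 7 0)] := by
  set v0 := PySem.List.pyGetD icon 0 0
  set v1 := PySem.List.pyGetD icon 1 0
  set v2 := PySem.List.pyGetD icon 2 0
  set v3 := PySem.List.pyGetD icon 3 0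
  set v4 := PySem.List.pyGetD icon 4 0
  set v5 := PySem.List.pyGetD icon 5 0
  set v6 := PySem.List.pyGetD icon 6 0
  set v7 := PySem.List.pyGetD icon 7 0
  have e0 : innerA v0 [List.replicate 8 (0:Int), List.replicate 8 (0:Int), List.replicate 8 (0:Int), List.replicate 8 (0:Int), List.replicate 8 (0:Int), List.replicate 8 (0:Int), List.replicate 8 (0:Int), List.replicate 8 (0:Int)] (0:Int) = [rowAlist v0, List.replicate 8 (0:Int), List.replicate 8 (0:Int), List.replicate 8 (0:Int), List.replicate 8 (0:Int), List.replicate 8 (0:Int), List.replicate 8 (0:Int), List.replicate 8 (0:Int)] := by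
    have h := innerA_eq v0 [List.replicate 8 (0:Int), List.replicate 8 (0:Int), List.replicate 8 (0:Int), List.replicate 8 (0:Int), List.replicate 8 (0:Int), List.replicate 8 (0:Int), List.replicate 8 (0:Int), List.replicate 8 (0:Int)] 0 (by norm_num) 0 0 0 0 0 0 0 0 (by rfl)
    simpa [List.set] using h
  have e1 : innerA v1 [rowAlist v0, List.replicate 8 (0:Int), List.replicate 8 (0:Int), List.replicate 8 (0:Int), List.replicate 8 (0:Int), List.replicate 8 (0:Int), List.replicate 8 (0:Int), List.replicate 8 (0:Int)] (1:Int) = [rowAlist v0, rowAlist v1, List.replicate 8 (0:Int), List.replicate 8 (0:Int), List.replicate 8 (0:Int), List.replicate 8 (0:Int), List.replicate 8 (0:Int), List.replicate 8 (0:Int)] := by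
    have h := innerA_eq v1 [rowAlist v0, List.replicate 8 (0:Int), List.replicate 8 (0:Int), List.replicate 8 (0:Int), List.replicate 8 (0:Int), List.replicate 8 (0:Int), List.replicate 8 (0:Int), List.replicate 8 (0:Int)] 1 (by norm_num) 0 0 0 0 0 0 0 0 (by rfl)
    simpa [List.set] using h
  have e2 : innerA v2 [rowAlist v0, rowAlist v1, List.replicate 8 (0:Int), List.replicate 8 (0:Int), List.replicate 8 (0:Int), List.replicate 8 (0:Int), List.replicate 8 (0:Int), List.replicate 8 (0:Int)] (2:Int) = [rowAlist v0, rowAlist v1, rowAlist v2, List.replicate 8 (0:Int), List.replicate 8 (0:Int), List.replicate 8 (0:Int), List.replicate 8 (0:Int), List.replicate 8 (0:Int)] := by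
    have h := innerA_eq v2 [rowAlist v0, rowAlist v1, List.replicate 8 (0:Int), List.replicate 8 (0:Int), List.replicate 8 (0:Int), List.replicate 8 (0:Int), List.replicate 8 (0:Int), List.replicate 8 (0:Int)] 2 (by norm_num) 0 0 0 0 0 0 0 0 (by rfl)
    simpa [List.set] using h
  have e3 : innerA v3 [rowAlist v0, rowAlist v1, rowAlist v2, List.replicate 8 (0:Int), List.replicate 8 (0:Int), List.replicate 8 (0:Int), List.replicate 8 (0:Int), List.replicate 8 (0:Int)] (3:Int) = [rowAlist v0, rowAlist v1, rowAlist v2, rowAlist v3, List.replicate 8 (0:Int), List.replicate 8 (0:Int), List.replicate 8 (0:Int), List.replicate 8 (0:Int)] := by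
    have h := innerA_eq v3 [rowAlist v0, rowAlist v1, rowAlist v2, List.replicate 8 (0:Int), List.replicate 8 (0:Int), List.replicate 8 (0:Int), List.replicate 8 (0:Int), List.replicate 8 (0:Int)] 3 (by norm_num) 0 0 0 0 0 0 0 0 (by rfl)
    simpa [List.set] using h
  have e4 : innerA v4 [rowAlist v0, rowAlist v1, rowAlist v2, rowAlist v3, List.replicate 8 (0:Int), List.replicate 8 (0:Int), List.replicate 8 (0:Int), List.replicate 8 (0:Int)] (4:Int) = [rowAlist v0, rowAlist v1, rowAlist v2, rowAlist v3, rowAlist v4, List.replicate 8 (0:Int), List.replicate 8 (0:Int), List.replicate 8 (0:Int)] := by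
    have h := innerA_eq v4 [rowAlist v0, rowAlist v1, rowAlist v2, rowAlist v3, List.replicate 8 (0:Int), List.replicate 8 (0:Int), List.replicate 8 (0:Int), List.replicate 8 (0:Int)] 4 (by norm_num) 0 0 0 0 0 0 0 0 (by rfl)
    simpa [List.set] using h
  have e5 : innerA v5 [rowAlist v0, rowAlist v1, rowAlist v2, rowAlist v3, rowAlist v4, List.replicate 8 (0:Int), List.replicate 8 (0:Int), List.replicate 8 (0:Int)] (5:Int) = [rowAlist v0, rowAlist v1, rowAlist v2, rowAlist v3, rowAlist v4, rowAlist v5, List.replicate 8 (0:Int), List.replicate 8 (0:Int)] := by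
    have h := innerA_eq v5 [rowAlist v0, rowAlist v1, rowAlist v2, rowAlist v3, rowAlist v4, List.replicate 8 (0:Int), List.replicate 8 (0:Int), List.replicate 8 (0:Int)] 5 (by norm_num) 0 0 0 0 0 0 0 0 (by rfl)
    simpa [List.set] using h
  have e6 : innerA v6 [rowAlist v0, rowAlist v1, rowAlist v2, rowAlist v3, rowAlist v4, rowAlist v5, List.replicate 8 (0:Int), List.replicate 8 (0:Int)] (6:Int) = [rowAlist v0, rowAlist v1, rowAlist v2, rowAlist v3, rowAlist v4, rowAlist v5, rowAlist v6, List.replicate 8 (0:Int)] := by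
    have h := innerA_eq v6 [rowAlist v0, rowAlist v1, rowAlist v2, rowAlist v3, rowAlist v4, rowAlist v5, List.replicate 8 (0:Int), List.replicate 8 (0:Int)] 6 (by norm_num) 0 0 0 0 0 0 0 0 (by rfl)
    simpa [List.set] using h
  have e7 : innerA v7 [rowAlist v0, rowAlist v1, rowAlist v2, rowAlist v3, rowAlist v4, rowAlist v5, rowAlist v6, List.replicate 8 (0:Int)] (7:Int) = [rowAlist v0, rowAlist v1, rowAlist v2, rowAlist v3, rowAlist v4, rowAlist v5, rowAlist v6, rowAlist v7] := by
    have h := innerA_eq v7 [rowAlist v0, rowAlist v1, rowAlist v2, rowAlist v3, rowAlist v4, rowAlist v5, rowAlist v6, List.replicate 8 (0:Int)] 7 (by norm_num) 0 0 0 0 0 0 0 0 (by rfl)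
    simpa [List.set] using h
  simp only [icon_to_pixels_py, pyRange8, List.foldl_cons, List.foldl_nil]
  simp only [show (List.replicate 8 (List.replicate 8 (0:Int))) = [List.replicate 8 (0:Int), List.replicate 8 (0:Int), List.replicate 8 (0:Int), List.replicate 8 (0:Int), List.replicate 8 (0:Int), List.replicate 8 (0:Int), List.replicate 8 (0:Int), List.replicate 8 (0:Int)] from rfl]
  rw [e0, e1, e2, e3, e4, e5, e6, e7]

theorem charB (icon : List Int) : icon_to_pixels_py_alt icon =
    [pvRowB (PySem.List.pyGetD icon 0 0), pvRowB (PySem.List.pyGetD icon 1 0),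
     pvRowB (PySem.List.pyGetD icon 2 0), pvRowB (PySem.List.pyGetD icon 3 0),
     pvRowB (PySem.List.pyGetD icon 4 0), pvRowB (PySem.List.pyGetD icon 5 0),
     pvRowB (PySem.List.pyGetD icon 6 0), pvRowB (PySem.List.pyGetD icon 7 0)] := by
  simp only [icon_to_pixels_py_alt, pyRange8, List.map_cons, List.map_nil]

theorem and_mod256 (n c : Nat) (hc : c < 256) : n &&& c = (n % 256) &&& c := by
  apply Nat.eq_of_testBit_eq; intro i
  rw [Nat.testBit_and, Nat.testBit_and]
  show _ = ((n % 2^8).testBit i && _)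
  rw [Nat.testBit_mod_two_pow]
  by_cases hi : i < 8
  · simp [hi]
  · have h8 : (256:Nat) ≤ 2 ^ i := by
      calc (256:Nat) = 2^8 := by norm_num
      _ ≤ 2^i := Nat.pow_le_pow_right (by norm_num) (by omega)
    have : c.testBit i = false := Nat.testBit_lt_two_pow (lt_of_lt_of_le hc h8)
    simp [this]

theorem rowAlist_eq (v : Int) : rowAlist v =
    [if PySem.Int.band v 128 = 0 then 0 else 1, if PySem.Int.band v 64 = 0 then 0 else 1,
     if PySem.Int.band v 32 = 0 then 0 else 1, if PySem.Int.band v 16 = 0 then 0 else 1,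
     if PySem.Int.band v 8 = 0 then 0 else 1, if PySem.Int.band v 4 = 0 then 0 else 1,
     if PySem.Int.band v 2 = 0 then 0 else 1, if PySem.Int.band v 1 = 0 then 0 else 1] := by
  have s7 : (1:Int) <<< (7:Nat) = 128 := by decide
  have s6 : (1:Int) <<< (6:Nat) = 64 := by decide
  have s5 : (1:Int) <<< (5:Nat) = 32 := by decide
  have s4 : (1:Int) <<< (4:Nat) = 16 := by decide
  have s3 : (1:Int) <<< (3:Nat) = 8 := by decide
  have s2 : (1:Int) <<< (2:Nat) = 4 := by decide
  have s1 : (1:Int) <<< (1:Nat) = 2 := by decide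
  have s0 : (1:Int) <<< (0:Nat) = 1 := by decide
  simp [rowAlist, bitA, Int.reduceToNat, s7, s6, s5, s4, s3, s2, s1, s0]

set_option maxRecDepth 20000 in
theorem keyPos : ∀ r : Nat, r < 256 →
    [if (r &&& 128) = 0 then (0:Int) else 1, if (r &&& 64) = 0 then (0:Int) else 1,
     if (r &&& 32) = 0 then (0:Int) else 1, if (r &&& 16) = 0 then (0:Int) else 1,
     if (r &&& 8) = 0 then (0:Int) else 1, if (r &&& 4) = 0 then (0:Int) else 1,
     if (r &&& 2) = 0 then (0:Int) else 1, if (r &&& 1) = 0 then (0:Int) else 1] =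
    (pvBin8 (r &&& 255)).map (fun c => if c = '1' then (1:Int) else 0) := by decide

set_option maxRecDepth 20000 in
theorem keyNeg : ∀ r : Nat, r < 256 →
    [if (128 - (r &&& 128) : Nat) = 0 then (0:Int) else 1, if (64 - (r &&& 64) : Nat) = 0 then (0:Int) else 1,
     if (32 - (r &&& 32) : Nat) = 0 then (0:Int) else 1, if (16 - (r &&& 16) : Nat) = 0 then (0:Int) else 1,
     if (8 - (r &&& 8) : Nat) = 0 then (0:Int) else 1, if (4 - (r &&& 4) : Nat) = 0 then (0:Int) else 1,
     if (2 - (r &&& 2) : Nat) = 0 then (0:Int) else 1, if (1 - (r &&& 1) : Nat) = 0 then (0:Int) else 1] =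
    (pvBin8 (255 - (r &&& 255))).map (fun c => if c = '1' then (1:Int) else 0) := by decide

theorem row_eq (v : Int) : rowAlist v = pvRowB v := by
  rw [rowAlist_eq]
  by_cases hv : 0 ≤ v
  · obtain ⟨n, rfl⟩ : ∃ n : Nat, v = (n : Int) := ⟨v.toNat, (Int.toNat_of_nonneg hv).symm⟩
    have hb : ∀ c : Nat, PySem.Int.band (n : Int) (c : Int) = ((n &&& c : Nat) : Int) :=
      fun c => PySem.Int.band_natCast n c
    have h255 := hb 255; have h128 := hb 128; have h64 := hb 64; have h32 := hb 32
    have h16 := hb 16; have h8 := hb 8; have h4 := hb 4; have h2 := hb 2; have h1 := hb 1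
    push_cast at h255 h128 h64 h32 h16 h8 h4 h2 h1
    simp only [pvRowB, h255, h128, h64, h32, h16, h8, h4, h2, h1, Int.toNat_natCast,
      Nat.cast_eq_zero]
    rw [and_mod256 n 255 (by norm_num), and_mod256 n 128 (by norm_num),
        and_mod256 n 64 (by norm_num), and_mod256 n 32 (by norm_num),
        and_mod256 n 16 (by norm_num), and_mod256 n 8 (by norm_num),
        and_mod256 n 4 (by norm_num), and_mod256 n 2 (by norm_num),
        and_mod256 n 1 (by norm_num)]
    exact keyPos (n % 256) (Nat.mod_lt _ (by norm_num))
  · have hvneg : v < 0 := not_le.mp hv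
    obtain ⟨m, hm⟩ : ∃ m : Nat, (-v - 1 : Int) = (m : Int) :=
      ⟨(-v - 1).toNat, (Int.toNat_of_nonneg (by omega)).symm⟩
    have hb : ∀ c : Nat, PySem.Int.band v (c : Int) = ((c - (c &&& m) : Nat) : Int) := by
      intro c
      simp only [PySem.Int.band, if_neg hv, if_pos (Int.natCast_nonneg c), hm,
        Int.toNat_natCast]
    have h255 := hb 255; have h128 := hb 128; have h64 := hb 64; have h32 := hb 32
    have h16 := hb 16; have h8 := hb 8; have h4 := hb 4; have h2 := hb 2; have h1 := hb 1
    push_cast at h255 h128 h64 h32 h16 h8 h4 h2 h1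
    simp only [pvRowB, h255, h128, h64, h32, h16, h8, h4, h2, h1, Int.toNat_natCast,
      Nat.cast_eq_zero]
    rw [Nat.and_comm 255 m, Nat.and_comm 128 m, Nat.and_comm 64 m, Nat.and_comm 32 m,
        Nat.and_comm 16 m, Nat.and_comm 8 m, Nat.and_comm 4 m, Nat.and_comm 2 m,
        Nat.and_comm 1 m]
    rw [and_mod256 m 255 (by norm_num), and_mod256 m 128 (by norm_num),
        and_mod256 m 64 (by norm_num), and_mod256 m 32 (by norm_num),
        and_mod256 m 16 (by norm_num), and_mod256 m 8 (by norm_num),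
        and_mod256 m 4 (by norm_num), and_mod256 m 2 (by norm_num),
        and_mod256 m 1 (by norm_num)]
    exact keyNeg (m % 256) (Nat.mod_lt _ (by norm_num))

-- ===== VERDICT (by name: the statement is the Claim_ definition above) =====
theorem icon_to_pixels_py_spec : Claim_equal_icon_to_pixels_py := by
  intro icon _ _
  show icon_to_pixels_py icon = icon_to_pixels_py_alt icon
  rw [charA, charB]
  simp only [row_eq]
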